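-- pv_equiv track=rewrite | github.com/AJamal27891/dw-bench | scripts/generate_value_qa.py | trace_full_impact
-- ===== SOURCE A (Python) =====
-- from collections import defaultdict
--
-- def trace_full_impact(reverse_lineage: dict, source_table: str,
--                       source_row: str) -> dict:
--     """Trace forward impact. Returns {target_table: set(row_keys)}."""
--     all_targets = defaultdict(set)
--     queue = [f'{source_table}:{source_row}']
--     visited = set()
--     while queue:
--         src_id = queue.pop()
--         if src_id in visited:
--             continue
--         visited.add(src_id)
--         for target_table, target_row in reverse_lineage.get(src_id, []):
--             all_targets[target_table].add(target_row)
--             queue.append(f'{target_table}:{target_row}')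
--     return dict(all_targets)
-- ===== SOURCE B (Python) =====
-- def trace_full_impact(reverse_lineage: dict, source_table: str,
--                       source_row: str) -> dict:
--     """Trace forward impact. Returns {target_table: set(row_keys)}."""
--     # Phase 1: depth-first reachability; visit() returns the preorder list of
--     # the ids newly reached from src_id.
--     visited = set()
--
--     def visit(src_id):
--         if src_id in visited:
--             return []
--         visited.add(src_id)
--         order = [src_id]
--         # reversed() follows the same LIFO order a worklist would; the
--         # dict-of-sets result is insensitive to traversal order anyway.
--         for target_table, target_row in reversed(reverse_lineage.get(src_id, [])):
--             order.extend(visit(f'{target_table}:{target_row}'))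
--         return order
--
--     order = visit(f'{source_table}:{source_row}')
--
--     # Phase 2: aggregate the outgoing edges of every reached node.
--     result = {}
--     for src_id in order:
--         for target_table, target_row in reverse_lineage.get(src_id, []):
--             result.setdefault(target_table, set()).add(target_row)
--     return result
-- ===== Notes on version B (the rewrite author's own statement) =====
-- stated objective: alternative
-- what changed: A fuses discovery and aggregation in one explicit-worklist loop that updates the dict-of-sets while popping the queue; B splits the task into two staged passes: a recursive depth-first traversal that only records the visitation order, followed by a separate aggregation pass that builds the result dict from that order.
import Mathlib
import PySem

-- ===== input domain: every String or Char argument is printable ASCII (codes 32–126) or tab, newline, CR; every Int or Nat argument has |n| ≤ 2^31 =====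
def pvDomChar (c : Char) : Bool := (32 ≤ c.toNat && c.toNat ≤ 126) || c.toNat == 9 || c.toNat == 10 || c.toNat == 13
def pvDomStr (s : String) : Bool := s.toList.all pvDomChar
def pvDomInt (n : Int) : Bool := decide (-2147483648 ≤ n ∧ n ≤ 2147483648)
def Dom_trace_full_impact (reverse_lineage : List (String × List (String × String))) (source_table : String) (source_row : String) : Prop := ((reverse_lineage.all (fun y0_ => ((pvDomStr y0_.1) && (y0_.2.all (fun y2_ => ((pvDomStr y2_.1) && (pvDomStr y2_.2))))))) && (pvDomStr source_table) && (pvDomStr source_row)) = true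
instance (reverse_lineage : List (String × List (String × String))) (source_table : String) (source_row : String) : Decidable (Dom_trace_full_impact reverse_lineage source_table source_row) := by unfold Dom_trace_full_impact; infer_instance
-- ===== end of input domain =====

-- B replaces A's single fused worklist loop (which updates the dict-of-sets while popping the
-- queue) by two staged passes: a recursive DFS that returns the preorder list of reached ids,
-- then a separate aggregation pass building the result dict from that list (alternative decomposition).

-- ===== PORT A =====
-- A's while-loop over the explicit queue; fuel is only a totality guard (the loop pops each
-- pushed id once, and at most 1 + total number of edges ids are ever pushed, so the fuel
-- chosen at the top level never runs out). The Lean stack is the reversed Python queue: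
-- queue.pop() = pop the head, appending children = consing their ids in reverse.
def tfiFuel (reverse_lineage : List (String × List (String × String))) : Nat :=
  reverse_lineage.foldl (fun n p => n + p.2.length) 0 + 2

def tfiLoopA (reverse_lineage : List (String × List (String × String))) :
    Nat → List String →
    PySem.Set String × PySem.Dict String (PySem.Set String) →
    PySem.Set String × PySem.Dict String (PySem.Set String)
  | 0, _, st => st
  | _ + 1, [], st => st
  | f + 1, src_id :: queue, st =>
    if PySem.Set.contains st.1 src_id then
      tfiLoopA reverse_lineage f queue st
    else
      -- the single for-loop both fills all_targets and collects the ids to push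
      let acc := ((List.lookup src_id reverse_lineage).getD []).foldl
        (fun (a : PySem.Dict String (PySem.Set String) × List String) p =>
          (PySem.Dict.modify a.1 p.1 [] (fun s => PySem.Set.add s p.2),
           a.2 ++ [p.1 ++ ":" ++ p.2]))
        (st.2, [])
      tfiLoopA reverse_lineage f (acc.2.reverse ++ queue)
        (PySem.Set.add st.1 src_id, acc.1)

def trace_full_impact (reverse_lineage : List (String × List (String × String))) (source_table : String) (source_row : String) : List (String × List String) :=
  (tfiLoopA reverse_lineage (tfiFuel reverse_lineage)
      [source_table ++ ":" ++ source_row]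
      (PySem.Set.empty, PySem.Dict.empty)).2.items

-- ===== PORT B =====
-- Phase 1 of B: the recursive `visit`, here over a list of pending ids (the reversed children
-- still to be visited); it carries only the visited set and RETURNS the preorder list of ids
-- newly reached (Source B's `order`). Fuel is threaded through the recursion and returned, only as
-- a totality guard (one unit per processed id; the same bound as for A applies). `min` is a
-- termination artefact: the returned fuel never exceeds the fuel passed in (tfiVisit_fuel_le).
def tfiVisit (reverse_lineage : List (String × List (String × String))) :
    Nat → List String → PySem.Set String →
    (PySem.Set String × List String) × Nat
  | f, [], v => ((v, []), f)
  | 0, _ :: _, v => ((v, []), 0)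
  | f + 1, src_id :: rest, v =>
    if PySem.Set.contains v src_id then
      tfiVisit reverse_lineage f rest v
    else
      let r := tfiVisit reverse_lineage f
        ((((List.lookup src_id reverse_lineage).getD []).map
            (fun p => p.1 ++ ":" ++ p.2)).reverse)
        (PySem.Set.add v src_id)
      let r2 := tfiVisit reverse_lineage (min r.2 f) rest r.1.1
      ((r2.1.1, src_id :: (r.1.2 ++ r2.1.2)), r2.2)

-- Phase 2 of B: aggregate the outgoing edges of one reached node into the result dict.
def tfiStep (reverse_lineage : List (String × List (String × String)))
    (d : PySem.Dict String (PySem.Set String)) (src_id : String) :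
    PySem.Dict String (PySem.Set String) :=
  ((List.lookup src_id reverse_lineage).getD []).foldl
    (fun d p => PySem.Dict.modify d p.1 [] (fun s => PySem.Set.add s p.2)) d

def trace_full_impact_alt (reverse_lineage : List (String × List (String × String))) (source_table : String) (source_row : String) : List (String × List String) :=
  let order := ((tfiVisit reverse_lineage (tfiFuel reverse_lineage)
      [source_table ++ ":" ++ source_row] PySem.Set.empty).1).2
  (order.foldl (tfiStep reverse_lineage) PySem.Dict.empty).items

-- ===== PRECONDITION & SPEC =====
def Spec_trace_full_impact (reverse_lineage : List (String × List (String × String))) (source_table : String) (source_row : String) (out : List (String × List String)) : Prop := out = trace_full_impact_alt reverse_lineage source_table source_row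
instance (reverse_lineage : List (String × List (String × String))) (source_table : String) (source_row : String) (out : List (String × List String)) : Decidable (Spec_trace_full_impact reverse_lineage source_table source_row out) := by unfold Spec_trace_full_impact; infer_instance

-- ===== CLAIM (what is proved, stated in full; the proofs are below) =====
def Claim_equal_trace_full_impact : Prop := ∀ (reverse_lineage : List (String × List (String × String))) (source_table : String) (source_row : String), Dom_trace_full_impact reverse_lineage source_table source_row → Spec_trace_full_impact reverse_lineage source_table source_row (trace_full_impact reverse_lineage source_table source_row)

-- ===== LEMMAS AND PROOFS =====

-- The fuel returned by tfiVisit never exceeds the fuel passed in.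
theorem tfiVisit_fuel_le (rl : List (String × List (String × String))) :
    ∀ (f : Nat) (l : List String) (v : PySem.Set String), (tfiVisit rl f l v).2 ≤ f := by
  intro f l v
  fun_induction tfiVisit rl f l v with
  | case1 => simp
  | case2 => simp
  | case3 f x rest v h ih => omega
  | case4 f x rest v h r r2 ih2 ih1 =>
      exact le_trans ih1 (le_trans (Nat.min_le_right _ _) (Nat.le_succ f))

-- Visiting an appended pending list is visiting the pieces in sequence, threading the
-- visited set and the fuel and concatenating the produced preorder segments.
theorem tfiVisit_append (rl : List (String × List (String × String))) :
    ∀ (f : Nat) (l1 l2 : List String) (v : PySem.Set String),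
      tfiVisit rl f (l1 ++ l2) v =
        (((tfiVisit rl (tfiVisit rl f l1 v).2 l2 ((tfiVisit rl f l1 v).1).1).1.1,
          ((tfiVisit rl f l1 v).1).2 ++
            (tfiVisit rl (tfiVisit rl f l1 v).2 l2 ((tfiVisit rl f l1 v).1).1).1.2),
         (tfiVisit rl (tfiVisit rl f l1 v).2 l2 ((tfiVisit rl f l1 v).1).1).2) := by
  intro f l1 l2 v
  fun_induction tfiVisit rl f l1 v generalizing l2 with
  | case1 => simp
  | case2 => cases l2 <;> simp [tfiVisit]
  | case3 f x rest v h ih => simp only [List.cons_append, tfiVisit, h, if_true]; exact ih l2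
  | case4 f x rest v h r r2 ih2 ih1 =>
      simp only [List.cons_append, tfiVisit, h, Bool.false_eq_true, if_false]
      rw [ih1 l2]
      simp [r, r2]

-- A's fused loop equals B's two phases: starting from dict d and worklist l, the final dict
-- is d folded (with tfiStep) over the preorder list that phase 1 produces from l, and the
-- final visited set is phase 1's visited set.
theorem tfiLoopA_eq_phases (rl : List (String × List (String × String))) :
    ∀ (f : Nat) (l : List String) (v : PySem.Set String)
      (d : PySem.Dict String (PySem.Set String)),
      tfiLoopA rl f l (v, d) =
        (((tfiVisit rl f l v).1).1,
         ((tfiVisit rl f l v).1).2.foldl (tfiStep rl) d) := by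
  intro f l v d
  induction f using Nat.strong_induction_on generalizing l v d with
  | _ f ih =>
    match f, l with
    | 0, l => cases l <;> simp [tfiLoopA, tfiVisit]
    | f + 1, [] => simp [tfiLoopA, tfiVisit]
    | f + 1, x :: rest =>
      by_cases h : PySem.Set.contains v x
      · simp only [tfiLoopA, tfiVisit, h, if_true]
        exact ih f (by omega) rest v d
      · simp only [tfiLoopA, tfiVisit, h, Bool.false_eq_true, if_false]
        -- A's fused for-loop splits into the dict part (tfiStep) and the pushed-ids part
        have hacc : (((List.lookup x rl).getD []).foldl
            (fun (a : PySem.Dict String (PySem.Set String) × List String) p =>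
              (PySem.Dict.modify a.1 p.1 [] (fun s => PySem.Set.add s p.2),
               a.2 ++ [p.1 ++ ":" ++ p.2])) (d, [])) =
            (tfiStep rl d x,
             ((List.lookup x rl).getD []).map (fun p => p.1 ++ ":" ++ p.2)) := by
          unfold tfiStep
          rw [PySem.List.foldl_prod_mk
            (f := fun d (p : String × String) => PySem.Dict.modify d p.1 [] (fun s => PySem.Set.add s p.2))
            (g := fun (l : List String) (p : String × String) => l ++ [p.1 ++ ":" ++ p.2])]
          rw [PySem.List.foldl_append_singleton_eq_map, List.nil_append]
        rw [hacc]
        rw [ih f (by omega)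
          ((((List.lookup x rl).getD []).map (fun p => p.1 ++ ":" ++ p.2)).reverse ++ rest)
          (PySem.Set.add v x) (tfiStep rl d x)]
        rw [tfiVisit_append]
        rw [Nat.min_eq_left (tfiVisit_fuel_le rl f _ _)]
        simp [List.foldl_append]

-- ===== VERDICT (by name: the statement is the Claim_ definition above) =====
theorem trace_full_impact_spec : Claim_equal_trace_full_impact := by
  intro rl st sr _
  unfold Spec_trace_full_impact trace_full_impact trace_full_impact_alt
  rw [tfiLoopA_eq_phases]
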